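-- pv_equiv track=rewrite | github.com/JerryMazeyu/GreatLibrarian | Agents/BookStore/getData.py | extract_journal_information
-- ===== SOURCE A (Python) =====
-- def extract_journal_information(text, subject, subsubject):
--     """Extract information from the website https://www.jstor.org/journal/
--
--     Args:
--         text (str): Text copied from the website
--         subject (str): Subject of the journal, e.g. "Area Studies"
--         subsubject (str): Sub subject of the journal, e.g. "African American Studies"
--     """
--     res = {"TITLE": "", "PUBLISHED BY": "", "COVERAGE": "", "MOVING WALL": "", "ISSN":"", "EISSN": "", "SUBJECTS": "", "COLLECTIONS": "", "ABSTRACT": ""}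
--     sentences = text.split('\n')
--     max_len = 0
--     abstract = ''
--     for (ind, content) in enumerate(sentences):
--         if len(content) > max_len:
--             max_len = len(content)
--             abstract = content
--         if content == 'Support':
--             res["TITLE"] = sentences[ind+1]
--         if content == 'PUBLISHED BY':
--             res["PUBLISHED BY"] = sentences[ind+1]
--         if content == 'COVERAGE':
--             res["COVERAGE"] = sentences[ind+1]
--         if content == 'MOVING WALL':
--             res["MOVING WALL"] = sentences[ind+1]
--         if content == 'ISSN':
--             res["ISSN"] = sentences[ind+1]
--         if content == 'EISSN':
--             res["EISSN"] = sentences[ind+1]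
--         if content == 'SUBJECTS':
--             res["SUBJECTS"] = sentences[ind+1]
--         if content == 'COLLECTIONS':
--             res["COLLECTIONS"] = sentences[ind+1]
--
--         res["ABSTRACT"] = abstract
--     return res
-- ===== SOURCE B (Python) =====
-- def extract_journal_information(text, subject, subsubject):
--     """Extract information from the website https://www.jstor.org/journal/ (table-driven rewrite)."""
--     sentences = text.split('\n')
--     # last-occurrence index of every line (later duplicates overwrite earlier ones, as in A)
--     positions = {line: i for i, line in enumerate(sentences)}
--     # first line of maximal length (Python's max keeps the first maximum, matching A's strict '>')
--     abstract = max(sentences, key=len)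
--     res = {"TITLE": "", "PUBLISHED BY": "", "COVERAGE": "", "MOVING WALL": "", "ISSN": "",
--            "EISSN": "", "SUBJECTS": "", "COLLECTIONS": "", "ABSTRACT": abstract}
--     labels = [("Support", "TITLE"), ("PUBLISHED BY", "PUBLISHED BY"), ("COVERAGE", "COVERAGE"),
--               ("MOVING WALL", "MOVING WALL"), ("ISSN", "ISSN"), ("EISSN", "EISSN"),
--               ("SUBJECTS", "SUBJECTS"), ("COLLECTIONS", "COLLECTIONS")]
--     for label, key in labels:
--         if label in positions:
--             res[key] = sentences[positions[label] + 1]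
--     return res
-- ===== Notes on version B (the rewrite author's own statement) =====
-- stated objective: idiomatic
-- what changed: A's single loop with a 9-way if-chain and a running strict-max is replaced by building a line->last-index table via a dict comprehension, computing the abstract as max(sentences, key=len), and filling the result by iterating a fixed label->key mapping with table lookups.
import Mathlib
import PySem

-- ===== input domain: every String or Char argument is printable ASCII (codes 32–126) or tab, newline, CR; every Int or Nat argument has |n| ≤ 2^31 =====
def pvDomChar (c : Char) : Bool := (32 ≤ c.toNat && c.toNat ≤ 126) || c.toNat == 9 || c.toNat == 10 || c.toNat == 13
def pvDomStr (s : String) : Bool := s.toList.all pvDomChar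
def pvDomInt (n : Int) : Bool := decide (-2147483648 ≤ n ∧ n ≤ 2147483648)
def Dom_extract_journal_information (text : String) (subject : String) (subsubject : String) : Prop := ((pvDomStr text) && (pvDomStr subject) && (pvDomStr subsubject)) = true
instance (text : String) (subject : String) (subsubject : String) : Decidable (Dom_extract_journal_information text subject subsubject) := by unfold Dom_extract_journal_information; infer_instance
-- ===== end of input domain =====

-- B replaces A's single if-chain loop by a line->last-index table, a separate max(…, key=len) pass
-- and a fixed label->key mapping (idiomatic restructuring; return value proved identical on Pre_).

-- ===== PORT A =====
-- the initial result dict of A (and of B, up to the ABSTRACT entry)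
def ejiRes0 : PySem.Dict String String :=
  PySem.Dict.ofList [("TITLE",""),("PUBLISHED BY",""),("COVERAGE",""),("MOVING WALL",""),
                     ("ISSN",""),("EISSN",""),("SUBJECTS",""),("COLLECTIONS",""),("ABSTRACT","")]

-- body of A's for-loop (state: res, max_len, abstract)
def ejiStepA (sentences : List String) (st : PySem.Dict String String × Int × String)
    (p : Int × String) : PySem.Dict String String × Int × String :=
  let ind := p.1
  let content := p.2
  let ma := if PySem.Str.len content > st.2.1 then (PySem.Str.len content, content) else (st.2.1, st.2.2)
  let res := st.1
  let res := if content = "Support" then res.insert "TITLE" (PySem.List.pyGetD sentences (ind+1) "") else res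
  let res := if content = "PUBLISHED BY" then res.insert "PUBLISHED BY" (PySem.List.pyGetD sentences (ind+1) "") else res
  let res := if content = "COVERAGE" then res.insert "COVERAGE" (PySem.List.pyGetD sentences (ind+1) "") else res
  let res := if content = "MOVING WALL" then res.insert "MOVING WALL" (PySem.List.pyGetD sentences (ind+1) "") else res
  let res := if content = "ISSN" then res.insert "ISSN" (PySem.List.pyGetD sentences (ind+1) "") else res
  let res := if content = "EISSN" then res.insert "EISSN" (PySem.List.pyGetD sentences (ind+1) "") else res
  let res := if content = "SUBJECTS" then res.insert "SUBJECTS" (PySem.List.pyGetD sentences (ind+1) "") else res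
  let res := if content = "COLLECTIONS" then res.insert "COLLECTIONS" (PySem.List.pyGetD sentences (ind+1) "") else res
  let res := res.insert "ABSTRACT" ma.2
  (res, ma.1, ma.2)

def extract_journal_information (text : String) (subject : String) (subsubject : String) : List (String × String) :=
  let sentences := (PySem.Str.split? text "\n").getD []   -- sep "\n" ≠ "": split? is always some here
  let st := (PySem.List.enumerate sentences 0).foldl (ejiStepA sentences) (ejiRes0, 0, "")
  st.1.items

-- ===== PORT B =====
-- the fixed label -> result-key mapping of B
def ejiLabels : List (String × String) :=
  [("Support","TITLE"),("PUBLISHED BY","PUBLISHED BY"),("COVERAGE","COVERAGE"),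
   ("MOVING WALL","MOVING WALL"),("ISSN","ISSN"),("EISSN","EISSN"),
   ("SUBJECTS","SUBJECTS"),("COLLECTIONS","COLLECTIONS")]

-- body of B's for-loop over the label table ('if label in positions: res[key] = sentences[positions[label]+1]')
def ejiStepB (positions : PySem.Dict String Int) (sentences : List String)
    (res : PySem.Dict String String) (lk : String × String) : PySem.Dict String String :=
  match positions.get? lk.1 with
  | some i => res.insert lk.2 (PySem.List.pyGetD sentences (i+1) "")
  | none => res

def extract_journal_information_alt (text : String) (subject : String) (subsubject : String) : List (String × String) :=
  let sentences := (PySem.Str.split? text "\n").getD []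
  let positions : PySem.Dict String Int :=
    (PySem.List.enumerate sentences 0).foldl (fun d p => d.insert p.2 p.1) PySem.Dict.empty
  let abstract := (PySem.List.max? sentences (fun s => PySem.Str.len s)).getD ""   -- sentences is never empty
  let res0 : PySem.Dict String String :=
    PySem.Dict.ofList [("TITLE",""),("PUBLISHED BY",""),("COVERAGE",""),("MOVING WALL",""),
                       ("ISSN",""),("EISSN",""),("SUBJECTS",""),("COLLECTIONS",""),("ABSTRACT",abstract)]
  (ejiLabels.foldl (ejiStepB positions sentences) res0).items

-- ===== PRECONDITION & SPEC =====
def ejiLabelNames : List String :=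
  ["Support","PUBLISHED BY","COVERAGE","MOVING WALL","ISSN","EISSN","SUBJECTS","COLLECTIONS"]

-- Pre_ excludes exactly the inputs where A raises IndexError: the last line of text.split('\n')
-- is one of the eight label lines, so sentences[ind+1] is accessed one past the end.
def Pre_extract_journal_information (text : String) (subject : String) (subsubject : String) : Prop :=
  ∀ l ∈ ejiLabelNames, ((PySem.Str.split? text "\n").getD []).getLast? ≠ some l
instance (text : String) (subject : String) (subsubject : String) : Decidable (Pre_extract_journal_information text subject subsubject) := by unfold Pre_extract_journal_information; infer_instance

def pvWitness_extract_journal_information : String × String × String := ("Support\nMy Journal\nISSN\n1234-5678\nsome long abstract text", "Area Studies", "African American Studies")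

def Spec_extract_journal_information (text : String) (subject : String) (subsubject : String) (out : List (String × String)) : Prop := out = extract_journal_information_alt text subject subsubject
instance (text : String) (subject : String) (subsubject : String) (out : List (String × String)) : Decidable (Spec_extract_journal_information text subject subsubject out) := by unfold Spec_extract_journal_information; infer_instance

-- ===== CLAIM (what is proved, stated in full; the proofs are below) =====
def Claim_equal_extract_journal_information : Prop := ∀ (text : String) (subject : String) (subsubject : String), Dom_extract_journal_information text subject subsubject → Pre_extract_journal_information text subject subsubject → Spec_extract_journal_information text subject subsubject (extract_journal_information text subject subsubject)


-- ===== LEMMAS AND PROOFS =====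

-- generic: an invariant preserved by every step is preserved by the fold
theorem ejiFoldlInv {σ α : Type} (step : σ → α → σ) (P : σ → Prop)
    (h : ∀ st x, P st → P (step st x)) :
    ∀ (l : List α) (st : σ), P st → P (l.foldl step st) := by
  intro l
  induction l with
  | nil => intro st hp; exact hp
  | cons x t ih => intro st hp; exact ih _ (h st x hp)

-- generic: a projection of the state that evolves autonomously commutes with the fold
theorem ejiFoldlProj {σ α β : Type} (step : σ → α → σ) (proj : σ → β) (red : β → α → β)
    (h : ∀ st x, proj (step st x) = red (proj st) x) :
    ∀ (l : List α) (st : σ), proj (l.foldl step st) = l.foldl red (proj st) := by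
  intro l
  induction l with
  | nil => intro st; rfl
  | cons x t ih => intro st; simp only [List.foldl]; rw [ih, h]

def K9 : List String := ["TITLE","PUBLISHED BY","COVERAGE","MOVING WALL","ISSN","EISSN","SUBJECTS","COLLECTIONS","ABSTRACT"]

theorem insert_keys_K9 (d : PySem.Dict String String) (k : String) (v : String)
    (hd : d.keys = K9) (hk : k ∈ K9) : (d.insert k v).keys = K9 := by
  rw [PySem.Dict.keys_insert_of_contains]
  · exact hd
  · rw [PySem.Dict.contains_eq_decide_mem_keys, hd]; exact decide_eq_true hk

theorem ite_insert_keys (c : Prop) [Decidable c] (d : PySem.Dict String String) (k v : String)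
    (hd : d.keys = K9) (hk : k ∈ K9) : (if c then d.insert k v else d).keys = K9 := by
  split
  · exact insert_keys_K9 _ _ _ hd hk
  · exact hd

theorem stepA_keys (sent : List String) (st : PySem.Dict String String × Int × String)
    (p : Int × String) (h : st.1.keys = K9) : ((ejiStepA sent st p).1).keys = K9 := by
  simp only [ejiStepA]
  apply insert_keys_K9 _ _ _ _ (by decide)
  apply ite_insert_keys _ _ _ _ _ (by decide)
  apply ite_insert_keys _ _ _ _ _ (by decide)
  apply ite_insert_keys _ _ _ _ _ (by decide)
  apply ite_insert_keys _ _ _ _ _ (by decide)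
  apply ite_insert_keys _ _ _ _ _ (by decide)
  apply ite_insert_keys _ _ _ _ _ (by decide)
  apply ite_insert_keys _ _ _ _ _ (by decide)
  apply ite_insert_keys _ _ _ _ _ (by decide)
  exact h

theorem stepB_keys (positions : PySem.Dict String Int) (sent : List String)
    (res : PySem.Dict String String) (lk : String × String)
    (hk : lk.2 ∈ K9) (h : res.keys = K9) : (ejiStepB positions sent res lk).keys = K9 := by
  simp only [ejiStepB]
  cases positions.get? lk.1 with
  | none => exact h
  | some i => exact insert_keys_K9 _ _ _ h hk

-- push getD into a conditional dict
theorem getD_ite (c : Prop) [Decidable c] (d1 d2 : PySem.Dict String String) (k : String) :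
    (if c then d1 else d2).getD k "" = if c then d1.getD k "" else d2.getD k "" :=
  apply_ite (fun d : PySem.Dict String String => d.getD k "") c d1 d2

-- A's per-key evolution, for each (label, key) pair of the table
theorem stepA_getD (sent : List String) (st : PySem.Dict String String × Int × String)
    (p : Int × String) (lab k : String) (hlab : (lab, k) ∈ ejiLabels) :
    ((ejiStepA sent st p).1).getD k "" =
      if p.2 = lab then PySem.List.pyGetD sent (p.1+1) "" else st.1.getD k "" := by
  fin_cases hlab <;>
    simp [ejiStepA, getD_ite, PySem.Dict.getD_insert]

-- the running (abstract, max_len, abstract) transition, index-free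
def ejiRed2 (q : String × Int × String) (c : String) : String × Int × String :=
  (if PySem.Str.len c > q.2.1 then c else q.2.2,
   if PySem.Str.len c > q.2.1 then PySem.Str.len c else q.2.1,
   if PySem.Str.len c > q.2.1 then c else q.2.2)

theorem stepA_abs (sent : List String) (st : PySem.Dict String String × Int × String)
    (p : Int × String) :
    (((ejiStepA sent st p).1).getD "ABSTRACT" "", (ejiStepA sent st p).2.1, (ejiStepA sent st p).2.2) =
      ejiRed2 (st.1.getD "ABSTRACT" "", st.2.1, st.2.2) p.2 := by
  simp only [ejiStepA, PySem.Dict.getD_insert_self]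
  unfold ejiRed2
  by_cases h : PySem.Str.len p.2 > st.2.1
  · simp only [if_pos h]
  · simp only [if_neg h]

-- B's step leaves alone every key it does not target
theorem stepB_getD_ne (positions : PySem.Dict String Int) (sent : List String)
    (res : PySem.Dict String String) (lk : String × String) (k : String) (h : k ≠ lk.2) :
    (ejiStepB positions sent res lk).getD k "" = res.getD k "" := by
  simp only [ejiStepB]
  cases positions.get? lk.1 with
  | none => rfl
  | some i => rw [PySem.Dict.getD_insert]; exact if_neg h

theorem stepB_getD_self (positions : PySem.Dict String Int) (sent : List String)
    (res : PySem.Dict String String) (lab k : String) :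
    (ejiStepB positions sent res (lab, k)).getD k "" =
      (match positions.get? lab with
       | some i => PySem.List.pyGetD sent (i+1) ""
       | none => res.getD k "") := by
  simp only [ejiStepB]
  cases positions.get? lab with
  | none => rfl
  | some i => rw [PySem.Dict.getD_insert_self]

-- the scalar last-occurrence fold equals the option-valued last-occurrence fold
theorem eji_scalar_rel (lab : String) (f : Int → String) (l : List (Int × String)) :
    ∀ (o : Option Int),
      l.foldl (fun v p => if p.2 = lab then f p.1 else v)
        (match o with | some i => f i | none => "") =
      (match l.foldl (fun o p => if p.2 = lab then some p.1 else o) o with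
       | some i => f i | none => "") := by
  induction l with
  | nil => intro o; rfl
  | cons p t ih =>
    intro o
    by_cases hp : p.2 = lab
    · simp only [List.foldl, if_pos hp]
      exact ih (some p.1)
    · simp only [List.foldl, if_neg hp]
      exact ih o

-- positions.get? lab computed as a scalar fold over the enumeration
theorem positions_get (sent : List String) (lab : String) :
    ((PySem.List.enumerate sent 0).foldl (fun d p => d.insert p.2 p.1) PySem.Dict.empty).get? lab =
      (PySem.List.enumerate sent 0).foldl (fun o p => if p.2 = lab then some p.1 else o) none := by
  have h : ∀ (d : PySem.Dict String Int) (p : Int × String),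
      (d.insert p.2 p.1).get? lab = if p.2 = lab then some p.1 else d.get? lab := by
    intro d p
    rw [PySem.Dict.get?_insert]
    by_cases hc : p.2 = lab
    · rw [if_pos hc, if_pos hc.symm]
    · rw [if_neg hc, if_neg (fun hh => hc hh.symm)]
  have := ejiFoldlProj (fun d p => d.insert p.2 p.1) (fun d : PySem.Dict String Int => d.get? lab)
      (fun o p => if p.2 = lab then some p.1 else o) h (PySem.List.enumerate sent 0) PySem.Dict.empty
  simpa [PySem.Dict.get?_empty] using this

-- max(·, key=len) of a nonempty list as a plain running first-maximum fold
theorem eji_maxopt (t : List String) : ∀ (a : String),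
    PySem.List.max? (a :: t) (fun s => PySem.Str.len s) =
    some (t.foldl (fun m x => if PySem.Str.len m < PySem.Str.len x then x else m) a) := by
  induction t with
  | nil => intro a; rfl
  | cons x t ih =>
    intro a
    have h1 : PySem.List.max? (a :: x :: t) (fun s => PySem.Str.len s) =
        PySem.List.max? ((if PySem.Str.len a < PySem.Str.len x then x else a) :: t) (fun s => PySem.Str.len s) := by
      simp only [PySem.List.max?, List.foldl]
      by_cases h : PySem.Str.len a < PySem.Str.len x
      · rw [if_pos h, if_pos h]
      · rw [if_neg h, if_neg h]
    rw [h1, ih]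
    rfl

-- A's running strict-max triple follows the plain first-maximum fold
theorem eji_maxfold (t : List String) : ∀ (a : String),
    t.foldl ejiRed2 (a, PySem.Str.len a, a) =
    (t.foldl (fun m x => if PySem.Str.len m < PySem.Str.len x then x else m) a,
     PySem.Str.len (t.foldl (fun m x => if PySem.Str.len m < PySem.Str.len x then x else m) a),
     t.foldl (fun m x => if PySem.Str.len m < PySem.Str.len x then x else m) a) := by
  induction t with
  | nil => intro a; rfl
  | cons x t ih =>
    intro a
    simp only [List.foldl]
    have hstep : ∀ (b : String), ejiRed2 (b, PySem.Str.len b, b) x =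
        ((if PySem.Str.len b < PySem.Str.len x then x else b),
         PySem.Str.len (if PySem.Str.len b < PySem.Str.len x then x else b),
         (if PySem.Str.len b < PySem.Str.len x then x else b)) := by
      intro b
      unfold ejiRed2
      by_cases h : PySem.Str.len b < PySem.Str.len x
      · simp only [if_pos h]
      · simp only [if_neg h]
    rw [hstep a]
    by_cases h : PySem.Str.len a < PySem.Str.len x
    · simp only [if_pos h]
      exact ih x
    · simp only [if_neg h]
      exact ih a

theorem eji_len_zero (s : String) (h : PySem.Str.len s ≤ 0) : s = "" := by
  simp only [PySem.Str.len] at h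
  have h0 : s.toList.length = 0 := by omega
  have h2 : s.toList = [] := List.length_eq_zero_iff.mp h0
  have h3 := congrArg String.ofList h2
  simpa using h3

-- A's final ABSTRACT entry is the first line of maximal length
theorem abstract_eq (sent : List String) :
    (((PySem.List.enumerate sent 0).foldl (ejiStepA sent) (ejiRes0, 0, "")).1).getD "ABSTRACT" "" =
      (PySem.List.max? sent (fun s => PySem.Str.len s)).getD "" := by
  have hproj := ejiFoldlProj (ejiStepA sent)
      (fun st : PySem.Dict String String × Int × String => (st.1.getD "ABSTRACT" "", st.2.1, st.2.2))
      (fun q p => ejiRed2 q p.2) (fun st p => stepA_abs sent st p)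
      (PySem.List.enumerate sent 0) (ejiRes0, 0, "")
  have hfst := congrArg (fun q : String × Int × String => q.1) hproj
  simp only at hfst
  rw [hfst]
  have hmap : (PySem.List.enumerate sent 0).foldl (fun q p => ejiRed2 q p.2) (ejiRes0.getD "ABSTRACT" "", 0, "") =
      sent.foldl ejiRed2 (ejiRes0.getD "ABSTRACT" "", 0, "") := by
    conv_rhs => rw [← PySem.List.map_snd_enumerate sent 0]
    rw [List.foldl_map]
  rw [hmap]
  cases sent with
  | nil => rfl
  | cons s0 t =>
    simp only [List.foldl]
    have h1 : ejiRed2 (ejiRes0.getD "ABSTRACT" "", 0, "") s0 = (s0, PySem.Str.len s0, s0) := by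
      by_cases h : (0 : Int) < PySem.Str.len s0
      · show ejiRed2 ("", 0, "") s0 = (s0, PySem.Str.len s0, s0)
        unfold ejiRed2
        simp only [if_pos h]
      · have hz : s0 = "" := eji_len_zero s0 (by omega)
        subst hz; rfl
    rw [h1, eji_maxfold, eji_maxopt t s0]
    rfl

-- the final equality, phrased on an arbitrary sentence list
theorem eji_core (sent : List String) :
    (((PySem.List.enumerate sent 0).foldl (ejiStepA sent) (ejiRes0, 0, "")).1).items =
    ((ejiLabels.foldl
        (ejiStepB ((PySem.List.enumerate sent 0).foldl (fun d p => d.insert p.2 p.1) PySem.Dict.empty) sent)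
        (PySem.Dict.ofList [("TITLE",""),("PUBLISHED BY",""),("COVERAGE",""),("MOVING WALL",""),
                            ("ISSN",""),("EISSN",""),("SUBJECTS",""),("COLLECTIONS",""),
                            ("ABSTRACT",(PySem.List.max? sent (fun s => PySem.Str.len s)).getD "")])).items) := by
  set pos := (PySem.List.enumerate sent 0).foldl (fun d p => d.insert p.2 p.1) PySem.Dict.empty with hposdef
  set abs := (PySem.List.max? sent (fun s => PySem.Str.len s)).getD "" with habsdef
  set res0' := PySem.Dict.ofList [("TITLE",""),("PUBLISHED BY",""),("COVERAGE",""),("MOVING WALL",""),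
                            ("ISSN",""),("EISSN",""),("SUBJECTS",""),("COLLECTIONS",""),("ABSTRACT",abs)] with hres0'
  set finalA := ((PySem.List.enumerate sent 0).foldl (ejiStepA sent) (ejiRes0, 0, "")).1 with hfinalA
  set finalB := ejiLabels.foldl (ejiStepB pos sent) res0' with hfinalB
  have hKA : finalA.keys = K9 := by
    rw [hfinalA]
    exact ejiFoldlInv (ejiStepA sent) (fun st => st.1.keys = K9)
      (fun st p h => stepA_keys sent st p h) _ _ (by decide)
  have hKB : finalB.keys = K9 := by
    rw [hfinalB]
    simp only [ejiLabels, List.foldl]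
    apply stepB_keys _ _ _ _ (by decide)
    apply stepB_keys _ _ _ _ (by decide)
    apply stepB_keys _ _ _ _ (by decide)
    apply stepB_keys _ _ _ _ (by decide)
    apply stepB_keys _ _ _ _ (by decide)
    apply stepB_keys _ _ _ _ (by decide)
    apply stepB_keys _ _ _ _ (by decide)
    apply stepB_keys _ _ _ _ (by decide)
    rw [hres0']; rfl
  -- A's entry for each (label, key) of the table
  have hA8 : ∀ lab k, (lab, k) ∈ ejiLabels →
      finalA.getD k "" =
        (match pos.get? lab with
         | some i => PySem.List.pyGetD sent (i+1) ""
         | none => "") := by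
    intro lab k hm
    have hproj := ejiFoldlProj (ejiStepA sent)
        (fun st : PySem.Dict String String × Int × String => st.1.getD k "")
        (fun v p => if p.2 = lab then PySem.List.pyGetD sent (p.1+1) "" else v)
        (fun st p => stepA_getD sent st p lab k hm)
        (PySem.List.enumerate sent 0) (ejiRes0, 0, "")
    have h0 : ejiRes0.getD k "" = "" := by fin_cases hm <;> rfl
    rw [hfinalA, hproj, h0, hposdef, positions_get]
    exact eji_scalar_rel lab (fun i => PySem.List.pyGetD sent (i+1) "") _ none
  -- B's entry for each (label, key) of the table
  have hB8 : ∀ lab k, (lab, k) ∈ ejiLabels →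
      finalB.getD k "" =
        (match pos.get? lab with
         | some i => PySem.List.pyGetD sent (i+1) ""
         | none => "") := by
    intro lab k hm
    rw [hfinalB]
    simp only [ejiLabels, List.foldl]
    fin_cases hm <;>
    · repeat rw [stepB_getD_ne _ _ _ _ _ (by decide)]
      rw [stepB_getD_self]
      cases pos.get? _ with
      | none =>
        simp only
        repeat rw [stepB_getD_ne _ _ _ _ _ (by decide)]
        rw [hres0']; rfl
      | some i => rfl
  -- the ABSTRACT entries agree
  have hAabs : finalA.getD "ABSTRACT" "" = abs := abstract_eq sent
  have hBabs : finalB.getD "ABSTRACT" "" = abs := by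
    rw [hfinalB]
    simp only [ejiLabels, List.foldl]
    repeat rw [stepB_getD_ne _ _ _ _ _ (by decide)]
    rw [hres0']; rfl
  rw [PySem.Dict.items_eq_map_keys finalA (hKA ▸ (by decide : K9.Nodup)) "",
      PySem.Dict.items_eq_map_keys finalB (hKB ▸ (by decide : K9.Nodup)) "",
      hKA, hKB]
  apply List.map_congr_left
  intro k hk
  have hvals : finalA.getD k "" = finalB.getD k "" := by
    simp only [K9, List.mem_cons, List.not_mem_nil, or_false] at hk
    rcases hk with rfl|rfl|rfl|rfl|rfl|rfl|rfl|rfl|rfl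
    · rw [hA8 "Support" _ (by decide), hB8 "Support" _ (by decide)]
    · rw [hA8 "PUBLISHED BY" _ (by decide), hB8 "PUBLISHED BY" _ (by decide)]
    · rw [hA8 "COVERAGE" _ (by decide), hB8 "COVERAGE" _ (by decide)]
    · rw [hA8 "MOVING WALL" _ (by decide), hB8 "MOVING WALL" _ (by decide)]
    · rw [hA8 "ISSN" _ (by decide), hB8 "ISSN" _ (by decide)]
    · rw [hA8 "EISSN" _ (by decide), hB8 "EISSN" _ (by decide)]
    · rw [hA8 "SUBJECTS" _ (by decide), hB8 "SUBJECTS" _ (by decide)]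
    · rw [hA8 "COLLECTIONS" _ (by decide), hB8 "COLLECTIONS" _ (by decide)]
    · rw [hAabs, hBabs]
  rw [hvals]

-- ===== VERDICT (by name: the statement is the Claim_ definition above) =====
theorem extract_journal_information_spec : Claim_equal_extract_journal_information := by
  intro text subject subsubject _ _
  unfold Spec_extract_journal_information
  unfold extract_journal_information extract_journal_information_alt
  exact eji_core ((PySem.Str.split? text "\n").getD [])
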